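-- pv_equiv track=rewrite | github.com/gigamonkeyx/pygentback | src/ai/nlp/testing.py | _assess_overall_performance
-- ===== SOURCE A (Python) =====
-- from typing import List, Dict, Any, Optional, Tuple
--
-- def _assess_overall_performance(analysis: Dict[str, Any]) -> str:
--     """Assess overall performance"""
--     perf_analysis = analysis.get('performance_analysis', {})
--
--     assessments = []
--     for metric, data in perf_analysis.items():
--         if 'assessment' in data:
--             assessments.append(data['assessment'])
--
--     if not assessments:
--         return "Unknown"
--
--     # Determine overall assessment
--     if all(a == 'good' for a in assessments):
--         return "Excellent"
--     elif any(a in ['critical', 'severe'] for a in assessments):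
--         return "Poor"
--     elif any(a == 'warning' for a in assessments):
--         return "Moderate"
--     else:
--         return "Good"
-- ===== SOURCE B (Python) =====
-- def _rank(a: str) -> int:
--     if a == 'good':
--         return 0
--     if a == 'warning':
--         return 2
--     if a in ('critical', 'severe'):
--         return 3
--     return 1
--
-- def _assess_overall_performance(analysis):
--     """Assess overall performance by tracking the worst severity seen in one pass."""
--     perf_analysis = analysis.get('performance_analysis', {})
--     worst = -1
--     for data in perf_analysis.values():
--         if 'assessment' in data:
--             r = _rank(data['assessment'])
--             if r > worst:
--                 worst = r
--     if worst < 0: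
--         return "Unknown"
--     if worst == 0:
--         return "Excellent"
--     if worst >= 3:
--         return "Poor"
--     if worst == 2:
--         return "Moderate"
--     return "Good"
-- ===== Notes on version B (the rewrite author's own statement) =====
-- stated objective: simpler
-- what changed: Replaces the collected assessments list and the three all/any rescans by a single pass that keeps a running worst-severity rank (good=0, other=1, warning=2, critical/severe=3) and dispatches on that maximum.
import Mathlib
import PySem

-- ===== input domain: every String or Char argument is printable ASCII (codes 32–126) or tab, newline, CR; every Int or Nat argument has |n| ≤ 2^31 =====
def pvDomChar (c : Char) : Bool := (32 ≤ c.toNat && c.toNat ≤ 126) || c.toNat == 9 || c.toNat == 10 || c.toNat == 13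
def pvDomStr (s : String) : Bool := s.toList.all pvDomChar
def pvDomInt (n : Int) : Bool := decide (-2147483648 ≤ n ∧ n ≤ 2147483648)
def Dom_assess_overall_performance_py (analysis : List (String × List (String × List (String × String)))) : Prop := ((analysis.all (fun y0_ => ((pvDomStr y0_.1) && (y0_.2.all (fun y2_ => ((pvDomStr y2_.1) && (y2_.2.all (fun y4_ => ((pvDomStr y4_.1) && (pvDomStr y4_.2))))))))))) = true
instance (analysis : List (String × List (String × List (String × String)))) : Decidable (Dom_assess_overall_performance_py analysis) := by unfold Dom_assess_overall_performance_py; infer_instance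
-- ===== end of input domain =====

-- B replaces A's collected assessments list and three all/any rescans by a single pass
-- keeping a running worst-severity rank; objective: simpler.

-- ===== PORT A =====
def assess_overall_performance_py (analysis : List (String × List (String × List (String × String)))) : String :=
  let perf := (List.lookup "performance_analysis" analysis).getD []
  let assessments := perf.foldl (fun acc p =>
      match List.lookup "assessment" p.2 with
      | some v => acc ++ [v]
      | none => acc) ([] : List String)
  if assessments.isEmpty then "Unknown"
  else if assessments.all (fun a => a == "good") then "Excellent"
  else if assessments.any (fun a => a == "critical" || a == "severe") then "Poor"
  else if assessments.any (fun a => a == "warning") then "Moderate"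
  else "Good"

-- ===== PORT B =====
def pyRank (a : String) : Int :=
  if a == "good" then 0
  else if a == "warning" then 2
  else if a == "critical" || a == "severe" then 3
  else 1

def assess_overall_performance_py_alt (analysis : List (String × List (String × List (String × String)))) : String :=
  let perf := (List.lookup "performance_analysis" analysis).getD []
  let worst := perf.foldl (fun w p =>
      match List.lookup "assessment" p.2 with
      | some v => if pyRank v > w then pyRank v else w
      | none => w) (-1 : Int)
  if worst < 0 then "Unknown"
  else if worst = 0 then "Excellent"
  else if worst ≥ 3 then "Poor"
  else if worst = 2 then "Moderate"
  else "Good"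

-- ===== PRECONDITION & SPEC =====
def Spec_assess_overall_performance_py (analysis : List (String × List (String × List (String × String)))) (out : String) : Prop := out = assess_overall_performance_py_alt analysis
instance (analysis : List (String × List (String × List (String × String)))) (out : String) : Decidable (Spec_assess_overall_performance_py analysis out) := by unfold Spec_assess_overall_performance_py; infer_instance

-- ===== CLAIM (what is proved, stated in full; the proofs are below) =====
def Claim_equal_assess_overall_performance_py : Prop := ∀ (analysis : List (String × List (String × List (String × String)))), Dom_assess_overall_performance_py analysis → Spec_assess_overall_performance_py analysis (assess_overall_performance_py analysis)

-- ===== LEMMAS AND PROOFS =====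

-- A's collection fold, and B's running-max fold, abstracted for the proof.
def pvCollect (acc : List String) (perf : List (String × List (String × String))) : List String :=
  perf.foldl (fun acc p =>
      match List.lookup "assessment" p.2 with
      | some v => acc ++ [v]
      | none => acc) acc

def pvMFold (w : Int) (l : List String) : Int :=
  l.foldl (fun w a => if pyRank a > w then pyRank a else w) w

lemma pvRank_nonneg (a : String) : 0 ≤ pyRank a := by
  unfold pyRank; split_ifs <;> norm_num

lemma pvRank_le_three (a : String) : pyRank a ≤ 3 := by
  unfold pyRank; split_ifs <;> norm_num

lemma pvCollect_append (perf : List (String × List (String × String))) :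
    ∀ acc, pvCollect acc perf = acc ++ pvCollect [] perf := by
  induction perf with
  | nil => intro acc; simp [pvCollect]
  | cons p rest ih =>
      intro acc
      cases h : List.lookup "assessment" p.2 with
      | none =>
          have h1 : pvCollect acc (p :: rest) = pvCollect acc rest := by
            simp [pvCollect, h]
          have h2 : pvCollect [] (p :: rest) = pvCollect [] rest := by
            simp [pvCollect, h]
          rw [h1, h2, ih acc]
      | some v =>
          have h1 : pvCollect acc (p :: rest) = pvCollect (acc ++ [v]) rest := by
            simp [pvCollect, h]
          have h2 : pvCollect [] (p :: rest) = pvCollect [v] rest := by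
            simp [pvCollect, h]
          rw [h1, h2, ih (acc ++ [v]), ih [v]]
          simp

lemma pvBfold_eq_mfold (perf : List (String × List (String × String))) :
    ∀ w : Int,
      perf.foldl (fun w p =>
        match List.lookup "assessment" p.2 with
        | some v => if pyRank v > w then pyRank v else w
        | none => w) w = pvMFold w (pvCollect [] perf) := by
  induction perf with
  | nil => intro w; simp [pvMFold, pvCollect]
  | cons p rest ih =>
      intro w
      simp only [List.foldl_cons]
      cases h : List.lookup "assessment" p.2 with
      | none => simp [h, ih w, pvCollect, pvMFold]
      | some v =>
          simp only [h]
          rw [ih]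
          have : pvCollect [] (p :: rest) = v :: pvCollect [] rest := by
            have h2 : pvCollect [] (p :: rest) = pvCollect [v] rest := by
              simp [pvCollect, h]
            rw [h2, pvCollect_append rest [v]]
            simp
          rw [this]
          simp [pvMFold]

lemma pvMFold_facts (l : List String) :
    ∀ w : Int, w ≤ pvMFold w l ∧ (∀ a ∈ l, pyRank a ≤ pvMFold w l) ∧
      (pvMFold w l = w ∨ ∃ a ∈ l, pvMFold w l = pyRank a) := by
  induction l with
  | nil => intro w; simp [pvMFold]
  | cons a l ih =>
      intro w
      have step : pvMFold w (a :: l) = pvMFold (if pyRank a > w then pyRank a else w) l := by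
        simp [pvMFold]
      obtain ⟨h1, h2, h3⟩ := ih (if pyRank a > w then pyRank a else w)
      have hw : w ≤ (if pyRank a > w then pyRank a else w) := by split_ifs <;> omega
      have ha : pyRank a ≤ (if pyRank a > w then pyRank a else w) := by split_ifs <;> omega
      rw [step]
      refine ⟨le_trans hw h1, ?_, ?_⟩
      · intro b hb
        rcases List.mem_cons.mp hb with rfl | hb
        · exact le_trans ha h1
        · exact h2 b hb
      · rcases h3 with h | ⟨b, hb, hbe⟩
        · by_cases hc : pyRank a > w
          · right
            refine ⟨a, List.mem_cons_self, ?_⟩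
            rw [h, if_pos hc]
          · left
            rw [h, if_neg hc]
        · exact Or.inr ⟨b, List.mem_cons_of_mem a hb, hbe⟩

lemma pvRank_ge_one {b : String} (hb : b ≠ "good") : 1 ≤ pyRank b := by
  unfold pyRank
  rw [if_neg (by simpa using hb)]
  split_ifs <;> norm_num

lemma pvRank_le_two {b : String} (hc : (b == "critical" || b == "severe") = false) :
    pyRank b ≤ 2 := by
  unfold pyRank
  by_cases g1 : (b == "good") = true
  · simp [g1]
  · by_cases g2 : (b == "warning") = true
    · simp [g1, g2]
    · simp [g1, g2, hc]

lemma pvRank_le_one {b : String} (hw : (b == "warning") = false)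
    (hc : (b == "critical" || b == "severe") = false) : pyRank b ≤ 1 := by
  unfold pyRank
  by_cases g1 : (b == "good") = true
  · simp [g1]
  · simp [g1, hw, hc]

theorem pvDispatch (l : List String) :
    (if l.isEmpty then "Unknown"
     else if l.all (fun a => a == "good") then "Excellent"
     else if l.any (fun a => a == "critical" || a == "severe") then "Poor"
     else if l.any (fun a => a == "warning") then "Moderate"
     else "Good")
    = (if pvMFold (-1) l < 0 then "Unknown"
       else if pvMFold (-1) l = 0 then "Excellent"
       else if pvMFold (-1) l ≥ 3 then "Poor"
       else if pvMFold (-1) l = 2 then "Moderate"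
       else "Good") := by
  cases l with
  | nil => simp [pvMFold]
  | cons a0 l0 =>
      set l := a0 :: l0 with hl
      obtain ⟨_, h2, h3⟩ := pvMFold_facts l (-1)
      set W := pvMFold (-1) l with hW
      have hWge : 0 ≤ W := le_trans (pvRank_nonneg a0) (h2 a0 (by simp [hl]))
      have hWle : W ≤ 3 := by
        rcases h3 with h | ⟨b, _, hbe⟩
        · omega
        · rw [hbe]; exact pvRank_le_three b
      have hne : ¬ l.isEmpty := by simp [hl]
      rw [if_neg hne, if_neg (by omega : ¬ W < 0)]
      by_cases hall : l.all (fun a => a == "good") = true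
      · have hW0 : W = 0 := by
          rcases h3 with h | ⟨b, hb, hbe⟩
          · omega
          · have : b = "good" := by
              have := List.all_eq_true.mp hall b hb; simpa using this
            rw [hbe, this]; simp [pyRank]
        simp [hall, hW0]
      · -- some element is not "good", so its rank ≥ 1, so W ≥ 1
        have hW1 : 1 ≤ W := by
          obtain ⟨b, hb, hbne⟩ : ∃ b ∈ l, b ≠ "good" := by
            by_contra hcon
            push Not at hcon
            exact hall (List.all_eq_true.mpr fun x hx => by simpa using hcon x hx)
          exact le_trans (pvRank_ge_one hbne) (h2 b hb)
        rw [if_neg hall, if_neg (by omega : ¬ W = 0)]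
        by_cases hcrit : l.any (fun a => a == "critical" || a == "severe") = true
        · have hW3 : 3 ≤ W := by
            obtain ⟨b, hb, hbe⟩ := List.any_eq_true.mp hcrit
            have : pyRank b = 3 := by
              rcases Bool.or_eq_true_iff.mp hbe with h | h
              · simp [pyRank, (by simpa using h : b = "critical")]
              · simp [pyRank, (by simpa using h : b = "severe")]
            calc (3:Int) = pyRank b := this.symm
              _ ≤ W := h2 b hb
          simp [hcrit, if_pos hW3]
        · have hnot3 : ∀ b ∈ l, pyRank b ≤ 2 := by
            intro b hb
            refine pvRank_le_two (Bool.eq_false_iff.mpr ?_)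
            intro hcb
            exact hcrit (List.any_eq_true.mpr ⟨b, hb, hcb⟩)
          have hWle2 : W ≤ 2 := by
            rcases h3 with h | ⟨b, hb, hbe⟩
            · omega
            · rw [hbe]; exact hnot3 b hb
          rw [if_neg hcrit, if_neg (by omega : ¬ W ≥ 3)]
          by_cases hwarn : l.any (fun a => a == "warning") = true
          · have hW2 : W = 2 := by
              obtain ⟨b, hb, hbe⟩ := List.any_eq_true.mp hwarn
              have : pyRank b = 2 := by simp [pyRank, (by simpa using hbe : b = "warning")]
              have := h2 b hb
              omega
            simp [hwarn, hW2]
          · have hW1' : W = 1 := by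
              have : ∀ b ∈ l, pyRank b ≤ 1 := by
                intro b hb
                refine pvRank_le_one (Bool.eq_false_iff.mpr ?_) (Bool.eq_false_iff.mpr ?_)
                · intro hcb; exact hwarn (List.any_eq_true.mpr ⟨b, hb, hcb⟩)
                · intro hcb; exact hcrit (List.any_eq_true.mpr ⟨b, hb, hcb⟩)
              rcases h3 with h | ⟨b, hb, hbe⟩
              · omega
              · have := this b hb; omega
            rw [if_neg hwarn, if_neg (by omega : ¬ W = 2)]

-- ===== VERDICT (by name: the statement is the Claim_ definition above) =====
theorem assess_overall_performance_py_spec : Claim_equal_assess_overall_performance_py := by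
  intro analysis _
  unfold Spec_assess_overall_performance_py assess_overall_performance_py assess_overall_performance_py_alt
  simp only []
  rw [pvBfold_eq_mfold]
  exact pvDispatch _
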